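-- pv_equiv track=rewrite | github.com/lulitados/pgrado | textos_corin/corin_merge.py | getFinalClauses
-- ===== SOURCE A (Python) =====
-- def getSubjectClause(tagged_clauses, clause):
--     for c in tagged_clauses:
--         clean_clause = clause.lstrip()
--         clean_clause = clean_clause.replace("\"", "")
--         clean_clause = clean_clause.replace('&', '&amp;')
--         if "".join(c[0].split()) == "".join(clean_clause.split()):
--             return c[1]
--     return None
--
-- def getFinalClauses(tagged_clauses, verb_clauses):
--     clauses = []
--     for c in verb_clauses:
--         subject = getSubjectClause(tagged_clauses, c[0])
--         if (subject is not None):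
--             clauses.append({
--                 'subject': subject,
--                 'verb': c[1],
--                 'clause': c[0]
--             })
--     return clauses
-- ===== SOURCE B (Python) =====
-- def getFinalClauses(tagged_clauses, verb_clauses):
--     # Build an index once: normalized tagged-clause text -> subject (first occurrence wins).
--     subject_by_key = {}
--     for text, subj in tagged_clauses:
--         k = "".join(text.split())
--         if k not in subject_by_key:
--             subject_by_key[k] = subj
--     clauses = []
--     for clause, verb in verb_clauses:
--         cleaned = clause.lstrip().replace("\"", "").replace('&', '&amp;')
--         subj = subject_by_key.get("".join(cleaned.split()))
--         if subj is not None: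
--             clauses.append({'subject': subj, 'verb': verb, 'clause': clause})
--     return clauses
-- ===== Notes on version B (the rewrite author's own statement) =====
-- stated objective: faster
-- what changed: Replaces the per-verb-clause linear scan of tagged_clauses with a dict built once (normalized clause text -> first subject), so each verb clause does one hash lookup instead of an O(T) scan.
import Mathlib
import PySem

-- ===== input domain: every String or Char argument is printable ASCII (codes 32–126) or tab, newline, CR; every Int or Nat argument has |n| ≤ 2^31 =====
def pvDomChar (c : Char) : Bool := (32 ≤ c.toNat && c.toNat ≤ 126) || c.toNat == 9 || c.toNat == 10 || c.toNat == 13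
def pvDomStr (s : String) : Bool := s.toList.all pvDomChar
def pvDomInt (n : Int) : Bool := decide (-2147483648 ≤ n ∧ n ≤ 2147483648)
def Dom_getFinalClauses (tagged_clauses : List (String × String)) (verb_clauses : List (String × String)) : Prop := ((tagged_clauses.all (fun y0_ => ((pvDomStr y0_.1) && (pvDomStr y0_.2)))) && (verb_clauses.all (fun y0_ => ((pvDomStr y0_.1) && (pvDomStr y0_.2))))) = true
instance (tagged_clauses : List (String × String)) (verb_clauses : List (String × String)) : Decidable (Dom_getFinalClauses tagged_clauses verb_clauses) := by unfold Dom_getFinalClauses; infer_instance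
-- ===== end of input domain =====

-- B builds a dict (normalized tagged text -> first subject) once, replacing A's per-verb-clause linear scan; objective: faster.

-- ===== PORT A =====
def getSubjectClause (tagged_clauses : List (String × String)) (clause : String) : Option String :=
  match tagged_clauses with
  | [] => none
  | c :: rest =>
    let clean1 := PySem.Str.lstrip clause
    let clean2 := PySem.Str.replace clean1 "\"" ""
    let clean3 := PySem.Str.replace clean2 "&" "&amp;"
    if PySem.Str.join "" (PySem.Str.split₀ c.1) == PySem.Str.join "" (PySem.Str.split₀ clean3)
    then some c.2
    else getSubjectClause rest clause

def getFinalClauses (tagged_clauses : List (String × String)) (verb_clauses : List (String × String)) : List (List (String × String)) :=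
  verb_clauses.foldl (fun clauses c =>
    match getSubjectClause tagged_clauses c.1 with
    | some subject => clauses ++ [[("subject", subject), ("verb", c.2), ("clause", c.1)]]
    | none => clauses) []

-- ===== PORT B =====
-- normalized key of a tagged clause: "".join(text.split())
def pvNormT (s : String) : String := PySem.Str.join "" (PySem.Str.split₀ s)

-- normalized key of a verb clause: lstrip, strip quotes, escape '&', drop whitespace
def pvNormV (s : String) : String :=
  PySem.Str.join "" (PySem.Str.split₀ (PySem.Str.replace (PySem.Str.replace (PySem.Str.lstrip s) "\"" "") "&" "&amp;"))

def pvBuildIndex (tagged_clauses : List (String × String)) : PySem.Dict String String :=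
  tagged_clauses.foldl (fun d c =>
    let k := pvNormT c.1
    if d.contains k then d else d.insert k c.2) PySem.Dict.empty

def getFinalClauses_alt (tagged_clauses : List (String × String)) (verb_clauses : List (String × String)) : List (List (String × String)) :=
  let idx := pvBuildIndex tagged_clauses
  verb_clauses.foldl (fun clauses c =>
    match idx.get? (pvNormV c.1) with
    | some subject => clauses ++ [[("subject", subject), ("verb", c.2), ("clause", c.1)]]
    | none => clauses) []

-- ===== PRECONDITION & SPEC =====
def Spec_getFinalClauses (tagged_clauses : List (String × String)) (verb_clauses : List (String × String)) (out : List (List (String × String))) : Prop := out = getFinalClauses_alt tagged_clauses verb_clauses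
instance (tagged_clauses : List (String × String)) (verb_clauses : List (String × String)) (out : List (List (String × String))) : Decidable (Spec_getFinalClauses tagged_clauses verb_clauses out) := by unfold Spec_getFinalClauses; infer_instance

-- ===== CLAIM (what is proved, stated in full; the proofs are below) =====
def Claim_equal_getFinalClauses : Prop := ∀ (tagged_clauses : List (String × String)) (verb_clauses : List (String × String)), Dom_getFinalClauses tagged_clauses verb_clauses → Spec_getFinalClauses tagged_clauses verb_clauses (getFinalClauses tagged_clauses verb_clauses)

-- ===== LEMMAS AND PROOFS =====

-- first-match scan characterisation used to relate the dict index to A's scan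
def pvScan (tagged_clauses : List (String × String)) (k : String) : Option String :=
  match tagged_clauses with
  | [] => none
  | c :: rest => if pvNormT c.1 == k then some c.2 else pvScan rest k

theorem pvBuildIndex_go_get? (tc : List (String × String)) (d : PySem.Dict String String) (k : String) :
    (tc.foldl (fun d c => let k := pvNormT c.1; if d.contains k then d else d.insert k c.2) d).get? k
      = (d.get? k).orElse (fun _ => pvScan tc k) := by
  induction tc generalizing d with
  | nil => cases h : d.get? k <;> simp [pvScan, Option.orElse, h]
  | cons c rest ih =>
    simp only [List.foldl_cons, ih, pvScan]
    by_cases hc : d.contains (pvNormT c.1)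
    · simp only [hc, if_true]
      by_cases hk : pvNormT c.1 = k
      · subst hk
        have : (d.get? (pvNormT c.1)).isSome := by rw [← PySem.Dict.contains_eq_isSome_get?]; exact hc
        cases h : d.get? (pvNormT c.1) with
        | none => rw [h] at this; simp at this
        | some v => simp [Option.orElse]
      · cases h : d.get? k <;> simp [Option.orElse, hk]
    · simp only [hc, if_false, Bool.false_eq_true]
      rw [PySem.Dict.get?_insert]
      by_cases hk : k = pvNormT c.1
      · subst hk
        have hn : d.get? (pvNormT c.1) = none := by
          cases h : d.get? (pvNormT c.1) with
          | none => rfl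
          | some v =>
            exfalso; apply hc
            rw [PySem.Dict.contains_eq_isSome_get?, h]; rfl
        simp [hn, Option.orElse]
      · simp only [if_neg hk]
        have hne : ¬ (pvNormT c.1 = k) := fun h => hk h.symm
        cases h : d.get? k <;> simp [Option.orElse, hne]

theorem pvIndex_get? (tc : List (String × String)) (k : String) :
    (pvBuildIndex tc).get? k = pvScan tc k := by
  unfold pvBuildIndex
  rw [pvBuildIndex_go_get?]
  simp [Option.orElse]

theorem getSubjectClause_eq_scan (tc : List (String × String)) (clause : String) :
    getSubjectClause tc clause = pvScan tc (pvNormV clause) := by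
  induction tc with
  | nil => rfl
  | cons c rest ih =>
    simp only [getSubjectClause, pvScan, pvNormT, pvNormV]
    split
    · rfl
    · exact ih

-- ===== VERDICT (by name: the statement is the Claim_ definition above) =====
theorem getFinalClauses_spec : Claim_equal_getFinalClauses := by
  intro tc vc _
  unfold Spec_getFinalClauses getFinalClauses getFinalClauses_alt
  congr 1
  funext clauses c
  rw [pvIndex_get?, ← getSubjectClause_eq_scan]
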